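-- pv_equiv track=rewrite | github.com/ram6ler/python-trotter | build/lib/trotter.py | _inverse_composition
-- ===== SOURCE A (Python) =====
-- from typing import List
--
-- _fact_cache = {2: 2}
--
-- def _fact(n: int) -> int:
--     """
--     `n`! (`n`-factorial)
--     """
--     if n <= 1:
--         return 1
--     else:
--         if not (n in _fact_cache.keys()):
--             _fact_cache[n] = n * _fact(n - 1)
--         return _fact_cache[n]
--
-- def _n_p_r(n: int, r: int) -> int:
--     """
--     The number of permutations of `r` items taken from `n`.
--     """
--     return _fact(n) // _fact(n - r)
--
-- def _n_c_r(n: int, r: int) -> int: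
--     """
--     The number of combinations of `r` items taken from `n`.
--     """
--     return _n_p_r(n, r) // _fact(r)
--
-- def _sorted_arrangement(arrangement: List, items: List) -> List:
--     """
--     The items in `arrangement` in the same order as they appear in `items`.
--     """
--     return sorted(arrangement, key=lambda item: items.index(item))
--
-- def _inverse_composition(composition: List, items: List) -> int:
--     """
--     The index of `composition` in the ordered compositions of items in `items`.
--     """
--     def helper(composition, items):
--         if len(composition) == 0:
--             return 0
--         else:
--             k = 0
--             n = len(items)
--             r = len(composition)
--             item_index = 0
--             while (composition[0] != items[item_index]):
--                 k += _n_c_r(n + r - item_index - 2, r - 1)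
--                 item_index += 1
--             return k + helper(composition[1:], items[item_index:])
--     return helper(_sorted_arrangement(composition, items), items)
-- ===== SOURCE B (Python) =====
-- from typing import List
--
-- _fact_cache = {2: 2}
--
-- def _fact(n: int) -> int:
--     if n <= 1:
--         return 1
--     else:
--         if not (n in _fact_cache.keys()):
--             _fact_cache[n] = n * _fact(n - 1)
--         return _fact_cache[n]
--
-- def _n_p_r(n: int, r: int) -> int:
--     return _fact(n) // _fact(n - r)
--
-- def _n_c_r(n: int, r: int) -> int:
--     return _n_p_r(n, r) // _fact(r)
--
-- def _inverse_composition(composition: List, items: List) -> int: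
--     # Single iterative pass with absolute offsets; the sum of binomials that A's
--     # inner while-loop accumulates is collapsed into a hockey-stick difference of
--     # just two binomials per element.
--     seq = sorted(composition, key=items.index)
--     n = len(items)
--     total = 0
--     off = 0
--     r = len(seq)
--     for x in seq:
--         i = items.index(x, off)
--         if i > off:
--             total += _n_c_r(n - off + r - 1, r) - _n_c_r(n - i + r - 1, r)
--         off = i
--         r -= 1
--     return total
-- ===== Notes on version B (the rewrite author's own statement) =====
-- stated objective: faster
-- what changed: Replaced A's recursive helper (list slicing plus an inner while-loop that evaluates one binomial coefficient per skipped item) by a single iterative pass over the sorted arrangement keeping an absolute offset, with each inner loop's sum of binomials collapsed via the hockey-stick identity into at most two binomial evaluations per element (and none when the element sits at the current offset).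
import Mathlib
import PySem

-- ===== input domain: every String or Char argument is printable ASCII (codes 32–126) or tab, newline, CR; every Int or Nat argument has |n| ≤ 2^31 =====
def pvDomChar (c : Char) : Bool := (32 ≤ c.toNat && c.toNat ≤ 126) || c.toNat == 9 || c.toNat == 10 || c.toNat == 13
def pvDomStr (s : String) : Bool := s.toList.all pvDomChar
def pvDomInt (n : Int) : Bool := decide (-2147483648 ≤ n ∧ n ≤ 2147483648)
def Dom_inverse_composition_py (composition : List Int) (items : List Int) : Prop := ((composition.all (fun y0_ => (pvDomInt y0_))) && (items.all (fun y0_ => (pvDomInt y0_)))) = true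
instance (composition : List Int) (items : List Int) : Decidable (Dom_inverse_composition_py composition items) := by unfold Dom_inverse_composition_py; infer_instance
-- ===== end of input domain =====

-- B replaces A's recursive helper (list slicing plus one binomial evaluation per skipped item) by one
-- iterative pass over the sorted arrangement with absolute offsets, collapsing each inner while-loop's
-- sum of binomials into a hockey-stick difference of at most two binomials per element (objective: faster).


-- ===== PORT A =====
-- module helper _fact (the memo cache only caches this same recursion; values are identical)
def factPy (n : Int) : Int :=
  if n ≤ 1 then 1 else n * factPy (n - 1)
termination_by n.toNat
decreasing_by omega

-- module helper _n_p_r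
def nprPy (n r : Int) : Int := PySem.Int.floordiv (factPy n) (factPy (n - r))

-- module helper _n_c_r
def ncrPy (n r : Int) : Int := PySem.Int.floordiv (nprPy n r) (factPy r)

-- module helper _sorted_arrangement; the key items.index(item) raises ValueError when item ∉ items
-- (such inputs are excluded by Pre_); the .getD 0 default is never used under Pre_.
def sortedArrangementPy (arrangement items : List Int) : List Int :=
  PySem.List.sorted arrangement (fun item => (PySem.List.index? items item).getD 0) false

-- the inner while-loop of A's helper: scans its, accumulating k and item_index
-- (Python raises IndexError if the list is exhausted; unreachable under Pre_)
def helperLoopPy (x n r : Int) : List Int → Int → Int → Int × Int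
  | [], k, idx => (k, idx)
  | y :: ys, k, idx =>
      if x = y then (k, idx)
      else helperLoopPy x n r ys (k + ncrPy (n + r - idx - 2) (r - 1)) (idx + 1)

-- A's recursive helper
def helperPy : List Int → List Int → Int
  | [], _ => 0
  | c :: cs, its =>
      let n : Int := (its.length : Int)
      let r : Int := ((c :: cs).length : Int)
      let p := helperLoopPy c n r its 0 0
      p.1 + helperPy cs (PySem.List.slice its (some p.2) none)

def inverse_composition_py (composition : List Int) (items : List Int) : Int :=
  helperPy (sortedArrangementPy composition items) items

-- ===== PORT B =====
-- the body of B's for-loop; state (total, off, r).  items.index(x, off) is hand-ported as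
-- off + index? of (items.drop off) — exact for 0 ≤ off ≤ len(items) and x present, which holds
-- throughout B's loop under Pre_.
def altStep (items : List Int) (n : Int) (st : Int × Int × Int) (x : Int) : Int × Int × Int :=
  let i : Int := st.2.1 + (((PySem.List.index? (items.drop st.2.1.toNat) x).getD 0 : Nat) : Int)
  (if st.2.1 < i then
     st.1 + (ncrPy (n - st.2.1 + st.2.2 - 1) st.2.2 - ncrPy (n - i + st.2.2 - 1) st.2.2)
   else st.1, i, st.2.2 - 1)

def inverse_composition_py_alt (composition : List Int) (items : List Int) : Int :=
  let seq := PySem.List.sorted composition (fun item => (PySem.List.index? items item).getD 0) false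
  (seq.foldl (altStep items (items.length : Int)) (0, 0, (seq.length : Int))).1

-- ===== PRECONDITION & SPEC =====
-- Python A raises ValueError (items.index) exactly when some element of composition is absent
-- from items; B raises there too.
def Pre_inverse_composition_py (composition : List Int) (items : List Int) : Prop :=
  ∀ x ∈ composition, x ∈ items
instance (composition : List Int) (items : List Int) : Decidable (Pre_inverse_composition_py composition items) := by unfold Pre_inverse_composition_py; infer_instance

def pvWitness_inverse_composition_py : List Int × List Int := ([1, 2], [2, 1, 3])

def Spec_inverse_composition_py (composition : List Int) (items : List Int) (out : Int) : Prop := out = inverse_composition_py_alt composition items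
instance (composition : List Int) (items : List Int) (out : Int) : Decidable (Spec_inverse_composition_py composition items out) := by unfold Spec_inverse_composition_py; infer_instance

-- ===== CLAIM (what is proved, stated in full; the proofs are below) =====
def Claim_equal_inverse_composition_py : Prop := ∀ (composition : List Int) (items : List Int), Dom_inverse_composition_py composition items → Pre_inverse_composition_py composition items → Spec_inverse_composition_py composition items (inverse_composition_py composition items)

-- ===== LEMMAS AND PROOFS =====

lemma factPy_natCast (a : Nat) : factPy (a : Int) = ((a.factorial : Nat) : Int) := by
  induction a with
  | zero => simp [factPy]
  | succ b ih =>
      rw [factPy]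
      by_cases hb : b = 0
      · subst hb; simp
      · have h1 : ¬ ((b + 1 : Nat) : Int) ≤ 1 := by omega
        rw [if_neg h1]
        have : ((b + 1 : Nat) : Int) - 1 = (b : Int) := by push_cast; ring
        rw [this, ih, Nat.factorial_succ]
        push_cast; ring

lemma ncrPy_natCast (a b : Nat) (h : b ≤ a) : ncrPy (a : Int) (b : Int) = ((a.choose b : Nat) : Int) := by
  have hsub : (a : Int) - (b : Int) = ((a - b : Nat) : Int) := by omega
  have hdiv : a.factorial / (a - b).factorial = a.choose b * b.factorial := by
    have := Nat.choose_mul_factorial_mul_factorial h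
    exact Nat.div_eq_of_eq_mul_left (Nat.factorial_pos _) (by omega)
  unfold ncrPy nprPy
  rw [hsub, factPy_natCast, factPy_natCast, factPy_natCast,
      PySem.Int.floordiv_natCast, hdiv, PySem.Int.floordiv_natCast,
      Nat.mul_div_cancel _ (Nat.factorial_pos _)]

-- A's inner loop computes the partial sum of binomials up to the first index of x
lemma helperLoopPy_spec (x n r : Int) :
    ∀ (l : List Int) (m : Nat), PySem.List.index? l x = some m →
    ∀ (k idx : Int), helperLoopPy x n r l k idx =
      (k + ∑ j ∈ Finset.range m, ncrPy (n + r - idx - (j : Int) - 2) (r - 1),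
       idx + (m : Int)) := by
  intro l
  induction l with
  | nil => intro m hm; simp [PySem.List.index?_eq_idxOf?] at hm
  | cons y ys ih =>
      intro m hm k idx
      by_cases hxy : x = y
      · subst hxy
        rw [PySem.List.index?_cons_self] at hm
        cases hm
        simp [helperLoopPy]
      · rw [PySem.List.index?_cons_of_ne ys (fun h => hxy h.symm)] at hm
        rcases Option.map_eq_some_iff.mp hm with ⟨m', hm', hmm⟩
        subst hmm
        rw [helperLoopPy, if_neg hxy, ih m' hm']
        simp only [Prod.mk.injEq]
        constructor
        · rw [Finset.sum_range_succ']
          have : ∀ j ∈ Finset.range m', ncrPy (n + r - (idx + 1) - (j : Int) - 2) (r - 1)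
              = ncrPy (n + r - idx - ((j + 1 : Nat) : Int) - 2) (r - 1) := by
            intro j _; congr 1; push_cast; ring
          rw [Finset.sum_congr rfl this]
          push_cast; ring_nf
        · push_cast; ring

-- hockey stick: the sum A's inner loop accumulates equals B's difference of two binomials
lemma hockey (N r : Nat) (hr : 1 ≤ r) :
    ∀ (m : Nat), m < N →
    (∑ j ∈ Finset.range m, ncrPy ((N : Int) + (r : Int) - (j : Int) - 2) ((r : Int) - 1))
      = ncrPy ((N : Int) + (r : Int) - 1) (r : Int) - ncrPy ((N : Int) - (m : Int) + (r : Int) - 1) (r : Int) := by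
  intro m
  induction m with
  | zero => intro _; simp
  | succ m' ih =>
      intro hm
      rw [Finset.sum_range_succ, ih (by omega)]
      set a : Nat := N + r - 2 - m' with ha
      have e1 : (N : Int) + (r : Int) - (m' : Int) - 2 = (a : Int) := by omega
      have e2 : (r : Int) - 1 = ((r - 1 : Nat) : Int) := by omega
      have e3 : (N : Int) - (m' : Int) + (r : Int) - 1 = ((a + 1 : Nat) : Int) := by push_cast; omega
      have e4 : (N : Int) - ((m' + 1 : Nat) : Int) + (r : Int) - 1 = (a : Int) := by push_cast; omega
      rw [e1, e2, e3, e4,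
          ncrPy_natCast a (r - 1) (by omega),
          ncrPy_natCast (a + 1) r (by omega),
          ncrPy_natCast a r (by omega)]
      have hpascal : (a + 1).choose r = a.choose (r - 1) + a.choose r := by
        have hrr : r = (r - 1) + 1 := by omega
        rw [hrr]
        exact Nat.choose_succ_succ a (r - 1)
      omega

lemma index?_drop (x : Int) (i : Nat) :
    ∀ (off : Nat) (items : List Int), off ≤ i → PySem.List.index? items x = some i →
    PySem.List.index? (items.drop off) x = some (i - off) := by
  intro off
  induction off generalizing i with
  | zero => intro items _ h; simpa using h
  | succ o ih =>
      intro items hoff h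
      cases items with
      | nil => simp [PySem.List.index?_eq_idxOf?] at h
      | cons y ys =>
          have hxy : x ≠ y := by
            intro he; subst he
            rw [PySem.List.index?_cons_self] at h
            cases h; omega
          rw [PySem.List.index?_cons_of_ne ys (fun he => hxy he.symm)] at h
          rcases Option.map_eq_some_iff.mp h with ⟨i', hi', hii⟩
          have hEq : i = i' + 1 := hii.symm
          subst hEq
          have := ih i' ys (by omega) hi'
          simpa [Nat.succ_sub_succ] using this

-- main loop invariant: B's fold over seq with absolute offset off computes A's helper on items.drop off
lemma main_invariant (items : List Int) :
    ∀ (seq : List Int) (off : Nat) (t : Int),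
    (∀ x ∈ seq, ∃ k : Nat, PySem.List.index? items x = some k ∧ off ≤ k) →
    seq.Pairwise (fun a b => ((PySem.List.index? items a).getD 0 : Nat) ≤ (PySem.List.index? items b).getD 0) →
    (seq.foldl (altStep items (items.length : Int)) (t, (off : Int), (seq.length : Int))).1
      = t + helperPy seq (items.drop off) := by
  intro seq
  induction seq with
  | nil => intro off t _ _; simp [helperPy]
  | cons x rest ih =>
      intro off t hmem hpair
      rcases hmem x (by simp) with ⟨i, hi, hoffi⟩
      have hlen : i < items.length := (PySem.List.getElem_of_index?_eq_some hi).1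
      have hrel : PySem.List.index? (items.drop off) x = some (i - off) := index?_drop x i off items hoffi hi
      have hio : (off : Int) + ((i - off : Nat) : Int) = (i : Int) := by omega
      -- one step of B's fold
      have hstep : altStep items (items.length : Int) (t, (off : Int), ((x :: rest).length : Int)) x
          = (t + (ncrPy ((items.length : Int) - (off : Int) + ((rest.length + 1 : Nat) : Int) - 1) ((rest.length + 1 : Nat) : Int)
                - ncrPy ((items.length : Int) - (i : Int) + ((rest.length + 1 : Nat) : Int) - 1) ((rest.length + 1 : Nat) : Int)),
             (i : Int), ((rest.length : Nat) : Int)) := by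
        unfold altStep
        have h1 : ((off : Int)).toNat = off := by omega
        rw [h1, hrel]
        simp only [Option.getD_some, List.length_cons, hio, Prod.mk.injEq]
        by_cases hcase : (off : Int) < (i : Int)
        · rw [if_pos hcase]
          exact ⟨rfl, trivial, by push_cast; ring⟩
        · rw [if_neg hcase]
          have hoi : (i : Int) = (off : Int) := by omega
          exact ⟨by rw [hoi]; ring, trivial, by push_cast; ring⟩
      rw [List.foldl_cons, hstep]
      -- tail conditions for the induction hypothesis
      have hpc := List.pairwise_cons.mp hpair
      have hmem' : ∀ y ∈ rest, ∃ k : Nat, PySem.List.index? items y = some k ∧ i ≤ k := by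
        intro y hy
        rcases hmem y (by simp [hy]) with ⟨k, hk, _⟩
        refine ⟨k, hk, ?_⟩
        have := hpc.1 y hy
        rw [hi, hk] at this
        simpa using this
      rw [ih i _ hmem' hpc.2]
      -- unfold one step of A's helper
      have hN : ((items.drop off).length : Int) = ((items.length - off : Nat) : Int) := by
        rw [List.length_drop]
      rw [helperPy]
      rw [helperLoopPy_spec x _ _ (items.drop off) (i - off) hrel 0 0]
      simp only [hN, List.length_cons]
      have hz : (0 : Int) + ((i - off : Nat) : Int) = ((i - off : Nat) : Int) := by ring
      rw [hz, PySem.List.slice_from_natCast, List.drop_drop]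
      have hdd : off + (i - off) = i := by omega
      rw [hdd]
      -- apply the hockey-stick identity with N = items.length - off, m = i - off, r = rest.length + 1
      have hsum := hockey (items.length - off) (rest.length + 1) (by omega) (i - off) (by omega)
      have hterms : ∀ j ∈ Finset.range (i - off),
          ncrPy (((items.length - off : Nat) : Int) + (((rest.length + 1 : Nat)) : Int) - 0 - (j : Int) - 2) ((((rest.length + 1 : Nat)) : Int) - 1)
            = ncrPy (((items.length - off : Nat) : Int) + (((rest.length + 1 : Nat)) : Int) - (j : Int) - 2) ((((rest.length + 1 : Nat)) : Int) - 1) := by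
        intro j _; congr 1
      have key : (∑ j ∈ Finset.range (i - off),
            ncrPy (((items.length - off : Nat) : Int) + (((rest.length + 1 : Nat)) : Int) - 0 - (j : Int) - 2) ((((rest.length + 1 : Nat)) : Int) - 1))
          = ncrPy ((items.length : Int) - (off : Int) + ((rest.length + 1 : Nat) : Int) - 1) ((rest.length + 1 : Nat) : Int)
            - ncrPy ((items.length : Int) - (i : Int) + ((rest.length + 1 : Nat) : Int) - 1) ((rest.length + 1 : Nat) : Int) := by
        rw [Finset.sum_congr rfl hterms, hsum]
        congr 1 <;> congr 1 <;> omega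
      rw [key]
      ring_nf

-- ===== VERDICT (by name: the statement is the Claim_ definition above) =====
theorem inverse_composition_py_spec : Claim_equal_inverse_composition_py := by
  intro composition items _ hpre
  unfold Spec_inverse_composition_py inverse_composition_py inverse_composition_py_alt sortedArrangementPy
  have hmem : ∀ x ∈ PySem.List.sorted composition (fun item => (PySem.List.index? items item).getD 0) false,
      ∃ k : Nat, PySem.List.index? items x = some k ∧ 0 ≤ k := by
    intro x hx
    rw [PySem.List.mem_sorted] at hx
    have hxit : x ∈ items := hpre x hx
    have := (PySem.List.index?_isSome_iff items x).mpr hxit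
    rcases Option.isSome_iff_exists.mp this with ⟨k, hk⟩
    exact ⟨k, hk, Nat.zero_le k⟩
  have hpair := PySem.List.sorted_pairwise composition (fun item => (PySem.List.index? items item).getD 0)
  have := main_invariant items
      (PySem.List.sorted composition (fun item => (PySem.List.index? items item).getD 0) false)
      0 0 hmem hpair
  simpa using this.symm
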